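-- pv_equiv track=rewrite | github.com/MiguelCarranza/FacebookHackerCup | 2014/qualification_round/2_basketball_game/basketball_game.py | divide_into_teams
-- ===== SOURCE A (Python) =====
-- def divide_into_teams(players):
--   odd = True
--   team_1 = []
--   team_2 = []
--
--   for player in players:
--     if odd:
--       team_1.append(player)
--       odd = False
--     else:
--       team_2.append(player)
--       odd = True
--
--   return (team_1, team_2)
-- ===== SOURCE B (Python) =====
-- def divide_into_teams(players):
--   players = list(players)
--   return (players[::2], players[1::2])
-- ===== Notes on version B (the rewrite author's own statement) =====
-- stated objective: idiomatic
-- what changed: Replaces the toggle-flag loop with alternating appends by two parity stride slices players[::2] and players[1::2].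
import Mathlib
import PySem

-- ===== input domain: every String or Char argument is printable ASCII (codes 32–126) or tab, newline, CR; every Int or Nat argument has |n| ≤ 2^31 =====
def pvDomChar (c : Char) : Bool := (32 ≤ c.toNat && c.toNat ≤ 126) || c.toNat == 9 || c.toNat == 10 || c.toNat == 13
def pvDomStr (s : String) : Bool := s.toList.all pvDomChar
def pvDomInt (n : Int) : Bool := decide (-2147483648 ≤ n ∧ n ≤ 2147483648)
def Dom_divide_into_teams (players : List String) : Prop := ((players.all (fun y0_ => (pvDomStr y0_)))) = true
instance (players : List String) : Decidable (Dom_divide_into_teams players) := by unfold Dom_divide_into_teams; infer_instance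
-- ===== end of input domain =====

-- B replaces A's toggle-flag loop with two parity stride slices (players[::2], players[1::2]); idiomatic, same cost.


-- ===== PORT A =====
def divide_into_teams (players : List String) : List String × List String :=
  let s := players.foldl
    (fun (st : Bool × List String × List String) player =>
      if st.1 then (false, st.2.1 ++ [player], st.2.2)
      else (true, st.2.1, st.2.2 ++ [player]))
    (true, [], [])
  (s.2.1, s.2.2)

-- ===== PORT B =====
-- players[::2] and players[1::2]; slice? is none only for step = 0, so .getD [] never fires (step = 2)
def divide_into_teams_alt (players : List String) : List String × List String :=
  ((PySem.List.slice? players none none 2).getD [],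
   (PySem.List.slice? players (some 1) none 2).getD [])

-- ===== PRECONDITION & SPEC =====
def Spec_divide_into_teams (players : List String) (out : List String × List String) : Prop := out = divide_into_teams_alt players
instance (players : List String) (out : List String × List String) : Decidable (Spec_divide_into_teams players out) := by unfold Spec_divide_into_teams; infer_instance

-- ===== CLAIM (what is proved, stated in full; the proofs are below) =====
def Claim_equal_divide_into_teams : Prop := ∀ (players : List String), Dom_divide_into_teams players → Spec_divide_into_teams players (divide_into_teams players)

-- ===== LEMMAS AND PROOFS =====

mutual
def pvEvens : List String → List String
  | [] => []
  | x :: r => x :: pvOdds r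
def pvOdds : List String → List String
  | [] => []
  | _ :: r => pvEvens r
end

-- the two parity selections, stated as the filterMap-over-range form slice? reduces to
theorem pv_filterMap_parity (xs : List String) :
    (List.filterMap (fun k => xs[2 * k]?) (List.range ((xs.length + 1) / 2)) = pvEvens xs) ∧
    (List.filterMap (fun k => xs[1 + 2 * k]?) (List.range (xs.length / 2)) = pvOdds xs) := by
  induction xs with
  | nil => simp [pvEvens, pvOdds]
  | cons x r ih =>
    constructor
    · have hc : (r.length + 1 + 1) / 2 = r.length / 2 + 1 := by omega
      simp only [List.length_cons, hc, List.range_succ_eq_map, List.filterMap_cons,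
        List.filterMap_map]
      simp only [Function.comp_def]
      have h1 : (fun k => (x :: r)[2 * (k + 1)]?) = (fun k => r[1 + 2 * k]?) := by
        funext k
        have : 2 * (k + 1) = (1 + 2 * k) + 1 := by omega
        rw [this, List.getElem?_cons_succ]
      simp [h1, ih.2, pvEvens]
    · have h1 : (fun k => (x :: r)[1 + 2 * k]?) = (fun k => r[2 * k]?) := by
        funext k
        have : 1 + 2 * k = (2 * k) + 1 := by omega
        rw [this, List.getElem?_cons_succ]
      simp only [List.length_cons]
      rw [h1]
      simpa [pvOdds] using ih.1

theorem pv_slice_evens (xs : List String) :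
    PySem.List.slice? xs none none 2 = some (pvEvens xs) := by
  rw [PySem.List.slice?]
  simp only [PySem.List.sliceIndices]
  norm_num
  have hf : (fun x : Nat => xs[(2 * (x:Int)).toNat]?) = (fun k : Nat => xs[2 * k]?) := by
    funext k
    have : ((2:Int) * (k:Int)).toNat = 2 * k := by omega
    rw [this]
  have hc : (if 0 < xs.length then (((xs.length:Int) + 2 - 1) / 2).toNat else 0) = (xs.length + 1) / 2 := by
    split <;> omega
  rw [hf, hc, (pv_filterMap_parity xs).1]

theorem pv_slice_odds (xs : List String) :
    PySem.List.slice? xs (some 1) none 2 = some (pvOdds xs) := by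
  rw [PySem.List.slice?]
  simp only [PySem.List.sliceIndices]
  norm_num
  by_cases h0 : xs.length = 0
  · rw [List.length_eq_zero_iff] at h0
    simp [h0, pvOdds]
  · have hmin : min 1 ((xs.length:Int)) = 1 := by omega
    rw [hmin]
    have hf : (fun x : Nat => xs[((1:Int) + 2 * (x:Int)).toNat]?) = (fun k : Nat => xs[1 + 2 * k]?) := by
      funext k
      have : ((1:Int) + 2 * (k:Int)).toNat = 1 + 2 * k := by omega
      rw [this]
    have hc : (if 1 < xs.length then (((xs.length:Int) - 1 + 2 - 1) / 2).toNat else 0) = xs.length / 2 := by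
      split <;> omega
    rw [hf, hc, (pv_filterMap_parity xs).2]

theorem pv_fold_split (xs : List String) (odd : Bool) (t1 t2 : List String) :
    (xs.foldl
      (fun (st : Bool × List String × List String) player =>
        if st.1 then (false, st.2.1 ++ [player], st.2.2)
        else (true, st.2.1, st.2.2 ++ [player]))
      (odd, t1, t2)).2
    = (t1 ++ (if odd then pvEvens xs else pvOdds xs),
       t2 ++ (if odd then pvOdds xs else pvEvens xs)) := by
  induction xs generalizing odd t1 t2 with
  | nil => cases odd <;> simp [pvEvens, pvOdds]
  | cons x r ih =>
    cases odd with
    | true => simp [List.foldl_cons, ih, pvEvens, pvOdds]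
    | false => simp [List.foldl_cons, ih, pvEvens, pvOdds]

-- ===== VERDICT (by name: the statement is the Claim_ definition above) =====
theorem divide_into_teams_spec : Claim_equal_divide_into_teams := by
  intro players _
  show _ = _
  unfold divide_into_teams divide_into_teams_alt
  rw [pv_slice_evens, pv_slice_odds]
  have h := pv_fold_split players true [] []
  simp only [h]
  simp
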